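-- pv_equiv track=rewrite | github.com/appmlk/ConDefects | Code/arc171_b/Python/51120581/correctVersion.py | makeTableBit
-- ===== SOURCE A (Python) =====
-- def makeTableBit(table, letter1="#", rev=False):
--     H,W = len(table), len(table[0])
--     res = []
--     for h in range(H):
--         rowBit = 0
--         for w in range(W):
--             if rev:
--                 if table[h][w] == letter1:
--                     rowBit += 2**w
--             else:
--                 if table[h][W-w-1] == letter1:
--                     rowBit += 2**w
--         res.append(rowBit)
--     return res
-- ===== SOURCE B (Python) =====
-- def makeTableBit(table, letter1="#", rev=False):
--     H, W = len(table), len(table[0])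
--     res = [0] * H
--     for c in range(W):
--         bit = (1 << c) if rev else (1 << (W - 1 - c))
--         for h in range(H):
--             if table[h][c] == letter1:
--                 res[h] += bit
--     return res
-- ===== Notes on version B (the rewrite author's own statement) =====
-- stated objective: alternative
-- what changed: B traverses the grid column-major, pre-allocating the whole result vector and adding each column's weight (computed once per column as a shift) into every matching row, instead of A's row-major building of one bitmask at a time that evaluates 2**w per matching cell.
import Mathlib
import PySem

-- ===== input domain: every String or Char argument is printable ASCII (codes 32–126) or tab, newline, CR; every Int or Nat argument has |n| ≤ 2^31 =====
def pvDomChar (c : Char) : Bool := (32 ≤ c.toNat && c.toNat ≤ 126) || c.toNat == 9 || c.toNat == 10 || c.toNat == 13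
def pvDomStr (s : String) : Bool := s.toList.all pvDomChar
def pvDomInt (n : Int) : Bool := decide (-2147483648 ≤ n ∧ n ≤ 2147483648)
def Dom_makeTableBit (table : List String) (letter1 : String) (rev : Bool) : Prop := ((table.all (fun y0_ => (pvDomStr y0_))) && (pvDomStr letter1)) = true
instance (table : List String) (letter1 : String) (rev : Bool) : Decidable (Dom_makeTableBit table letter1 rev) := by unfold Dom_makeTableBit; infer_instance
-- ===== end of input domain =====

-- B traverses the grid column-major, adding each column's weight into every matching row of a
-- preallocated result vector, instead of A's row-major bitmask accumulation (objective: alternative).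

-- ===== PORT A =====
def makeTableBit (table : List String) (letter1 : String) (rev : Bool) : List Int :=
  let H := table.length
  let W := (table.headD "").length     -- len(table[0]); table[0] on an empty table raises, excluded by Pre_
  (List.range H).foldl
    (fun res h =>
      let row := (table.getD h "").toList
      let rowBit := (List.range W).foldl
        (fun rowBit (w : Nat) =>
          if rev then
            if (PySem.List.pyGet? row (w : Int)).map (fun c => [c]) = some letter1.toList
            then rowBit + 2 ^ w else rowBit
          else
            if (PySem.List.pyGet? row ((W : Int) - (w : Int) - 1)).map (fun c => [c]) = some letter1.toList
            then rowBit + 2 ^ w else rowBit)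
        (0 : Int)
      res ++ [rowBit])
    []

-- ===== PORT B =====
def makeTableBit_alt (table : List String) (letter1 : String) (rev : Bool) : List Int :=
  let H := table.length
  let W := (table.headD "").length     -- len(table[0]); table[0] on an empty table raises, excluded by Pre_
  (List.range W).foldl
    (fun res (c : Nat) =>
      let bit : Int := if rev then 2 ^ c else 2 ^ (W - 1 - c)   -- 1 << c / 1 << (W-1-c)
      (List.range H).foldl
        (fun res h =>
          if (PySem.List.pyGet? (table.getD h "").toList (c : Int)).map (fun ch => [ch]) = some letter1.toList
          then res.set h (res.getD h 0 + bit) else res)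
        res)
    (List.replicate H 0)

-- ===== PRECONDITION & SPEC =====
-- Pre_ excludes exactly the inputs where Python A raises: the empty table (table[0] → IndexError)
-- and tables with a row shorter than the first row (inner indexing → IndexError).
def Pre_makeTableBit (table : List String) (letter1 : String) (rev : Bool) : Prop :=
  table ≠ [] ∧ ∀ s ∈ table, (table.headD "").length ≤ s.length
instance (table : List String) (letter1 : String) (rev : Bool) : Decidable (Pre_makeTableBit table letter1 rev) := by unfold Pre_makeTableBit; infer_instance
def pvWitness_makeTableBit : List String × String × Bool := (["#.", ".#"], "#", false)

def Spec_makeTableBit (table : List String) (letter1 : String) (rev : Bool) (out : List Int) : Prop := out = makeTableBit_alt table letter1 rev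
instance (table : List String) (letter1 : String) (rev : Bool) (out : List Int) : Decidable (Spec_makeTableBit table letter1 rev out) := by unfold Spec_makeTableBit; infer_instance

-- ===== CLAIM (what is proved, stated in full; the proofs are below) =====
def Claim_equal_makeTableBit : Prop := ∀ (table : List String) (letter1 : String) (rev : Bool), Dom_makeTableBit table letter1 rev → Pre_makeTableBit table letter1 rev → Spec_makeTableBit table letter1 rev (makeTableBit table letter1 rev)

-- ===== LEMMAS AND PROOFS =====

-- fold over range with conditional add = conditional sum (characterises A's inner loop)
theorem pvRangeFold (P : ℕ → Prop) [DecidablePred P] (g : ℕ → Int) : ∀ W : ℕ,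
    (List.range W).foldl (fun b w => if P w then b + g w else b) 0
      = ∑ w ∈ Finset.range W, if P w then g w else 0 := by
  intro W
  induction W with
  | zero => simp
  | succ n ih =>
    rw [List.range_succ, List.foldl_append, ih, Finset.sum_range_succ]
    simp only [List.foldl_cons, List.foldl_nil]
    split_ifs <;> simp

theorem pvFoldPush (f : ℕ → Int) : ∀ (l : List ℕ) (acc : List Int),
    l.foldl (fun res h => res ++ [f h]) acc = acc ++ l.map f := by
  intro l
  induction l with
  | nil => simp
  | cons x t ih => intro acc; simp [ih]

-- B's inner loop: one conditional in-place update per index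
theorem pvInnerFold (P : ℕ → Prop) [DecidablePred P] (b : Int) :
    ∀ (n : ℕ) (res : List Int),
      ((List.range n).foldl (fun res h => if P h then res.set h (res.getD h 0 + b) else res) res).length = res.length ∧
      ∀ i, ((List.range n).foldl (fun res h => if P h then res.set h (res.getD h 0 + b) else res) res).getD i 0
        = if i < n ∧ i < res.length ∧ P i then res.getD i 0 + b else res.getD i 0 := by
  intro n
  induction n with
  | zero => intro res; simp
  | succ n ih =>
    intro res
    obtain ⟨hlen, hget⟩ := ih res
    rw [List.range_succ]
    constructor
    · rw [List.foldl_append]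
      simp only [List.foldl_cons, List.foldl_nil]
      by_cases hP : P n
      · rw [if_pos hP, List.length_set, hlen]
      · rw [if_neg hP, hlen]
    · intro i
      rw [List.foldl_append]
      simp only [List.foldl_cons, List.foldl_nil]
      by_cases hP : P n
      · rw [if_pos hP]
        by_cases hin : i = n
        · subst hin
          by_cases hlt : i < res.length
          · rw [List.getD_eq_getElem?_getD, List.getElem?_set_self (by omega), Option.getD_some, hget]
            simp [hlt, hP]
          · rw [List.getD_eq_getElem?_getD, List.getElem?_set, if_pos rfl, hlen, if_neg hlt,
              if_neg (by tauto), List.getD_eq_getElem?_getD, List.getElem?_eq_none (by omega)]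
        · rw [List.getD_eq_getElem?_getD, List.getElem?_set_ne (by omega),
            ← List.getD_eq_getElem?_getD, hget]
          exact if_congr (by constructor <;> (rintro ⟨u1, u2, u3⟩; exact ⟨by omega, u2, u3⟩)) rfl rfl
      · rw [if_neg hP, hget]
        by_cases hin : i = n
        · subst hin; simp [hP]
        · exact if_congr (by constructor <;> (rintro ⟨u1, u2, u3⟩; exact ⟨by omega, u2, u3⟩)) rfl rfl

-- B's outer loop: each row accumulates the sum of its columns' contributions
theorem pvColFold (H : ℕ) (P : ℕ → ℕ → Prop) [∀ h c, Decidable (P h c)] (g : ℕ → Int) :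
    ∀ (m : ℕ) (res : List Int), res.length = H →
      ((List.range m).foldl
        (fun res c => (List.range H).foldl
          (fun res h => if P h c then res.set h (res.getD h 0 + g c) else res) res)
        res).length = H ∧
      ∀ i < H, ((List.range m).foldl
        (fun res c => (List.range H).foldl
          (fun res h => if P h c then res.set h (res.getD h 0 + g c) else res) res)
        res).getD i 0
        = res.getD i 0 + ∑ c ∈ Finset.range m, (if P i c then g c else 0) := by
  intro m
  induction m with
  | zero => intro res h; simpa using h
  | succ m ih =>
    intro res hres
    rw [List.range_succ, List.foldl_append]
    simp only [List.foldl_cons, List.foldl_nil]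
    obtain ⟨hlen, hget⟩ := ih res hres
    obtain ⟨hlen2, hget2⟩ := pvInnerFold (fun h => P h m) (g m) H
      ((List.range m).foldl (fun res c => (List.range H).foldl
        (fun res h => if P h c then res.set h (res.getD h 0 + g c) else res) res) res)
    refine ⟨by rw [hlen2, hlen], ?_⟩
    intro i hi
    rw [hget2, Finset.sum_range_succ]
    by_cases hP : P i m
    · rw [if_pos ⟨hi, by omega, hP⟩, hget i hi, if_pos hP]; ring
    · rw [if_neg (by tauto), hget i hi, if_neg hP]; ring

-- ===== VERDICT (by name: the statement is the Claim_ definition above) =====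
theorem makeTableBit_spec : Claim_equal_makeTableBit := by
  intro table letter1 rev _ hPre
  unfold Spec_makeTableBit makeTableBit makeTableBit_alt
  dsimp only
  cases rev with
  | true =>
    simp only [reduceIte]
    obtain ⟨hlenB, hgetB⟩ := pvColFold table.length
      (fun h c => (PySem.List.pyGet? (table.getD h "").toList (c : Int)).map (fun ch => [ch]) = some letter1.toList)
      (fun c => (2 : Int) ^ c)
      (table.headD "").length (List.replicate table.length 0) (by simp)
    rw [pvFoldPush, List.nil_append]
    apply List.ext_getElem
    · rw [List.length_map, List.length_range, hlenB]
    · intro i h1 h2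
      simp only [List.length_map, List.length_range] at h1
      simp only [List.getElem_map, List.getElem_range]
      have hgB := hgetB i h1
      rw [List.getD_eq_getElem?_getD, List.getElem?_eq_getElem h2, Option.getD_some] at hgB
      rw [hgB]
      have h0 : (List.replicate table.length (0 : Int)).getD i 0 = 0 := by
        simp [List.getD_eq_getElem?_getD]
      rw [h0, zero_add,
        pvRangeFold (fun w => (PySem.List.pyGet? (table.getD i "").toList (w : Int)).map (fun c => [c]) = some letter1.toList)
          (fun w => (2 : Int) ^ w) (table.headD "").length]
  | false =>
    simp only [Bool.false_eq_true, reduceIte]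
    obtain ⟨hlenB, hgetB⟩ := pvColFold table.length
      (fun h c => (PySem.List.pyGet? (table.getD h "").toList (c : Int)).map (fun ch => [ch]) = some letter1.toList)
      (fun c => (2 : Int) ^ ((table.headD "").length - 1 - c))
      (table.headD "").length (List.replicate table.length 0) (by simp)
    rw [pvFoldPush, List.nil_append]
    apply List.ext_getElem
    · rw [List.length_map, List.length_range, hlenB]
    · intro i h1 h2
      simp only [List.length_map, List.length_range] at h1
      simp only [List.getElem_map, List.getElem_range]
      have hgB := hgetB i h1
      rw [List.getD_eq_getElem?_getD, List.getElem?_eq_getElem h2, Option.getD_some] at hgB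
      rw [hgB]
      have h0 : (List.replicate table.length (0 : Int)).getD i 0 = 0 := by
        simp [List.getD_eq_getElem?_getD]
      rw [h0, zero_add,
        pvRangeFold (fun w => (PySem.List.pyGet? (table.getD i "").toList (((table.headD "").length : Int) - (w : Int) - 1)).map (fun c => [c]) = some letter1.toList)
          (fun w => (2 : Int) ^ w) (table.headD "").length,
        ← Finset.sum_range_reflect]
      apply Finset.sum_congr rfl
      intro c hc
      have hc' : c < (table.headD "").length := Finset.mem_range.mp hc
      have hidx : (((table.headD "").length : Int) - (((table.headD "").length - 1 - c : ℕ) : Int) - 1) = ((c : ℕ) : Int) := by omega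
      rw [hidx]
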